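-- pv_equiv track=rewrite | github.com/AbdullahKhames/alx-system_engineering-devops | 0x16-api_advanced/100-count.py | count_word_recursive
-- ===== SOURCE A (Python) =====
-- def count_word_recursive(titles, searched_key, index=0, count=0):
--     """Recursive function to count the number of times
--      a word appears in a list of titles"""
--     if titles is None or index == len(titles):
--         return count
--     else:
--         for word in titles[index].split():
--             if word.lower() == searched_key.lower():
--                 count += 1
--         return count_word_recursive(titles, searched_key, index + 1, count)
-- ===== SOURCE B (Python) =====
-- def count_word_recursive(titles, searched_key, index=0, count=0):
--     """Iterative: hoist the lowered key and loop over the remaining titles."""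
--     if titles is None:
--         return count
--     key = searched_key.lower()
--     for i in range(index, len(titles)):
--         for word in titles[i].split():
--             if word.lower() == key:
--                 count += 1
--     return count
-- ===== Notes on version B (the rewrite author's own statement) =====
-- stated objective: simpler
-- what changed: Replaces tail recursion over an index with a plain loop over range(index, len(titles)) and hoists searched_key.lower() out of the inner loop.
-- crash fix: When titles is a list and index > len(titles), A raises IndexError (titles[index]); B's range is empty there and it returns count. — e.g. on count_word_recursive(some ["a"], "a", 2, 5): A raises IndexError, B returns 5
import Mathlib
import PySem

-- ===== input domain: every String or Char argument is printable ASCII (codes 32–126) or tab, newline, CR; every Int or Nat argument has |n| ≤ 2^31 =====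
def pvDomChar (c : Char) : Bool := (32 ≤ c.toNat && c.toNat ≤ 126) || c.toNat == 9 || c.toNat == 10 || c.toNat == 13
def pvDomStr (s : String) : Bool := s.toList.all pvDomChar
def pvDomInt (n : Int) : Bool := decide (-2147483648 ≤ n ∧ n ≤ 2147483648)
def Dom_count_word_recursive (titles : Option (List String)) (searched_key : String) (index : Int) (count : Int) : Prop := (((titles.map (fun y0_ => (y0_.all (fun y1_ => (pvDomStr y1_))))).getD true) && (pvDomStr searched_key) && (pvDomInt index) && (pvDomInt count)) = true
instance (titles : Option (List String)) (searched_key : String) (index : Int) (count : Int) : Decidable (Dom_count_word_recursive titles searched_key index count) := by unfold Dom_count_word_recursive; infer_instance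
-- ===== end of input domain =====

-- B replaces A's tail recursion with a single loop over range(index, len(titles)),
-- hoisting searched_key.lower(); equal return values on Pre_ (no mutation involved).

-- ===== PORT A =====
-- needed by the port's decreasing_by: a successful index means index < length
theorem pv_pyGet?_lt {α : Type} (xs : List α) (i : Int) (x : α)
    (h : PySem.List.pyGet? xs i = some x) : i < (xs.length : Int) := by
  rcases lt_or_ge i (xs.length : Int) with h' | h'
  · exact h'
  · have hn : PySem.List.pyGet? xs i = none := by
      rw [PySem.List.pyGet?_eq_none_iff]
      simp [PySem.Raise.InRange]
      omega
    rw [hn] at h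
    exact absurd h (by simp)

def count_word_recursive (titles : Option (List String)) (searched_key : String) (index : Int) (count : Int) : Int :=
  match titles with
  | none => count
  | some ts =>
    if index = (ts.length : Int) then count
    else
      match h : PySem.List.pyGet? ts index with
      | none => count  -- Python raises IndexError here; excluded by Pre_
      | some t =>
        count_word_recursive (some ts) searched_key (index + 1)
          ((PySem.Str.split₀ t).foldl
            (fun c w => if PySem.Str.lower w = PySem.Str.lower searched_key then c + 1 else c) count)
  termination_by
    match titles with
    | none => 0
    | some ts => ((ts.length : Int) - index).toNat
  decreasing_by
    have := pv_pyGet?_lt ts index t h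
    show (((ts.length : Int) - (index + 1)).toNat < ((ts.length : Int) - index).toNat)
    omega

-- ===== PORT B =====
def count_word_recursive_alt (titles : Option (List String)) (searched_key : String) (index : Int) (count : Int) : Int :=
  match titles with
  | none => count
  | some ts =>
    let key := PySem.Str.lower searched_key
    (PySem.List.pyRange index (ts.length : Int) 1).foldl
      (fun c i =>
        (PySem.Str.split₀ (PySem.List.pyGetD ts i "")).foldl
          (fun c w => if PySem.Str.lower w = key then c + 1 else c) c)
      count

-- ===== PRECONDITION & SPEC =====
-- Pre_ excludes only the inputs on which A raises IndexError: some ts with index outside [-len, len].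
def Pre_count_word_recursive (titles : Option (List String)) (searched_key : String) (index : Int) (count : Int) : Prop :=
  (match titles with
   | none => true
   | some ts => decide (-(ts.length : Int) ≤ index ∧ index ≤ (ts.length : Int))) = true
instance (titles : Option (List String)) (searched_key : String) (index : Int) (count : Int) : Decidable (Pre_count_word_recursive titles searched_key index count) := by unfold Pre_count_word_recursive; infer_instance

def pvWitness_count_word_recursive : Option (List String) × String × Int × Int :=
  (some ["Hello world", "hello"], "hello", 0, 0)

-- When titles is a list and index > len(titles), A raises IndexError (titles[index]); B's range is empty there and it returns count.
def Raises_count_word_recursive (titles : Option (List String)) (searched_key : String) (index : Int) (count : Int) : Prop :=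
  (match titles with
   | none => false
   | some ts => decide ((ts.length : Int) < index)) = true
instance (titles : Option (List String)) (searched_key : String) (index : Int) (count : Int) : Decidable (Raises_count_word_recursive titles searched_key index count) := by unfold Raises_count_word_recursive; infer_instance

def pvRaiseWitness_count_word_recursive : Option (List String) × String × Int × Int :=
  (some ["a"], "a", 2, 5)
def pvRaiseWitnessOut_count_word_recursive : Int := 5

def Spec_count_word_recursive (titles : Option (List String)) (searched_key : String) (index : Int) (count : Int) (out : Int) : Prop := out = count_word_recursive_alt titles searched_key index count
instance (titles : Option (List String)) (searched_key : String) (index : Int) (count : Int) (out : Int) : Decidable (Spec_count_word_recursive titles searched_key index count out) := by unfold Spec_count_word_recursive; infer_instance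

-- ===== CLAIM (what is proved, stated in full; the proofs are below) =====
def Claim_equal_count_word_recursive : Prop := ∀ (titles : Option (List String)) (searched_key : String) (index : Int) (count : Int), Dom_count_word_recursive titles searched_key index count → Pre_count_word_recursive titles searched_key index count → Spec_count_word_recursive titles searched_key index count (count_word_recursive titles searched_key index count)

def Claim_raises_count_word_recursive : Prop := (∀ (titles : Option (List String)) (searched_key : String) (index : Int) (count : Int), Dom_count_word_recursive titles searched_key index count → Raises_count_word_recursive titles searched_key index count → ¬ Pre_count_word_recursive titles searched_key index count) ∧ (Dom_count_word_recursive (pvRaiseWitness_count_word_recursive.1) (pvRaiseWitness_count_word_recursive.2.1) (pvRaiseWitness_count_word_recursive.2.2.1) (pvRaiseWitness_count_word_recursive.2.2.2) ∧ Raises_count_word_recursive (pvRaiseWitness_count_word_recursive.1) (pvRaiseWitness_count_word_recursive.2.1) (pvRaiseWitness_count_word_recursive.2.2.1) (pvRaiseWitness_count_word_recursive.2.2.2) ∧ count_word_recursive_alt (pvRaiseWitness_count_word_recursive.1) (pvRaiseWitness_count_word_recursive.2.1) (pvRaiseWitness_count_word_recursive.2.2.1) (pvRaiseWitness_count_word_recursive.2.2.2)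 = pvRaiseWitnessOut_count_word_recursive)

-- ===== LEMMAS AND PROOFS =====
theorem count_word_main (ts : List String) (key : String) :
    ∀ (n : Nat) (index count : Int), -(ts.length : Int) ≤ index → index ≤ (ts.length : Int) →
    ((ts.length : Int) - index).toNat = n →
    count_word_recursive (some ts) key index count =
      (PySem.List.pyRange index (ts.length : Int) 1).foldl
        (fun c i =>
          (PySem.Str.split₀ (PySem.List.pyGetD ts i "")).foldl
            (fun c w => if PySem.Str.lower w = PySem.Str.lower key then c + 1 else c) c)
        count := by
  intro n
  induction n with
  | zero =>
    intro index count h1 h2 h3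
    have hix : index = (ts.length : Int) := by omega
    rw [count_word_recursive.eq_def, PySem.List.pyRange_one_eq_nil (by omega)]
    simp [hix]
  | succ n ih =>
    intro index count h1 h2 h3
    have hlt : index < (ts.length : Int) := by omega
    have hne : index ≠ (ts.length : Int) := by omega
    rw [count_word_recursive.eq_def, PySem.List.pyRange_one_cons hlt]
    simp only [hne, if_false, List.foldl_cons]
    have hin : PySem.Raise.InRange ts.length index := by
      simp [PySem.Raise.InRange]; omega
    obtain ⟨t, ht⟩ : ∃ t, PySem.List.pyGet? ts index = some t := by
      cases hg : PySem.List.pyGet? ts index with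
      | none => exact absurd ((PySem.List.pyGet?_eq_none_iff ts index).mp hg) (not_not_intro hin)
      | some t => exact ⟨t, rfl⟩
    rw [ht]
    have hgd : PySem.List.pyGetD ts index "" = t := by
      simp [PySem.List.pyGetD, ht]
    rw [hgd]
    exact ih (index + 1) _ (by omega) (by omega) (by omega)

-- ===== VERDICT (by name: the statement is the Claim_ definition above) =====
theorem count_word_recursive_spec : Claim_equal_count_word_recursive := by
  intro titles key index count _ hpre
  unfold Spec_count_word_recursive
  cases titles with
  | none => rw [count_word_recursive.eq_def]; rfl
  | some ts =>
    simp only [Pre_count_word_recursive, decide_eq_true_eq] at hpre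
    obtain ⟨h1, h2⟩ := hpre
    rw [count_word_recursive_alt]
    exact count_word_main ts key _ index count h1 h2 rfl

theorem count_word_recursive_raises : Claim_raises_count_word_recursive := by
  unfold Claim_raises_count_word_recursive
  refine ⟨?_, by decide⟩
  intro titles key index count _ hr hp
  cases titles with
  | none => simp [Raises_count_word_recursive] at hr
  | some ts =>
    simp only [Raises_count_word_recursive, decide_eq_true_eq] at hr
    simp only [Pre_count_word_recursive, decide_eq_true_eq] at hp
    omega

-- self-check: the raise witness really lies outside Pre_ (via the first half of the raises claim)
theorem pvRaiseWitness_count_word_recursive_ok :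
    ¬ Pre_count_word_recursive (some ["a"]) "a" 2 5 :=
  count_word_recursive_raises.1 (some ["a"]) "a" 2 5 (by decide) (by decide)
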